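-- pv_equiv track=rewrite | github.com/PurpurTentakel97/aoc-2022 | day_06/day_06_main.py | get_count_for_chars_repeating
-- ===== SOURCE A (Python) =====
-- def get_count_for_chars_repeating(line: str, value: int) -> int:
--     chars: list[str, ...] = list()
--     counter = 0
--     for char in line:
--         counter += 1
--         if len(chars) == len(set(chars)):
--             if char not in chars and len(chars) == value - 1:
--                 return counter
--
--         chars.append(char)
--         if len(chars) >= value:
--             del chars[0]
--
--     return 0
-- ===== SOURCE B (Python) =====
-- def get_count_for_chars_repeating(line: str, value: int) -> int:
--     last = {}   # last index at which each char was seen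
--     start = 0   # left edge of the current all-distinct window
--     for i, char in enumerate(line):
--         prev = last.get(char, -1)
--         if prev + 1 > start:
--             start = prev + 1
--         last[char] = i
--         if i - start + 1 == value:
--             return i + 1
--     return 0
-- ===== Notes on version B (the rewrite author's own statement) =====
-- stated objective: faster
-- what changed: Replaces the re-scanned deque window (set(), 'in' and slicing per character) by a one-pass sliding window that tracks each character's last-seen index and the left edge of the longest distinct suffix.
import Mathlib
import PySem

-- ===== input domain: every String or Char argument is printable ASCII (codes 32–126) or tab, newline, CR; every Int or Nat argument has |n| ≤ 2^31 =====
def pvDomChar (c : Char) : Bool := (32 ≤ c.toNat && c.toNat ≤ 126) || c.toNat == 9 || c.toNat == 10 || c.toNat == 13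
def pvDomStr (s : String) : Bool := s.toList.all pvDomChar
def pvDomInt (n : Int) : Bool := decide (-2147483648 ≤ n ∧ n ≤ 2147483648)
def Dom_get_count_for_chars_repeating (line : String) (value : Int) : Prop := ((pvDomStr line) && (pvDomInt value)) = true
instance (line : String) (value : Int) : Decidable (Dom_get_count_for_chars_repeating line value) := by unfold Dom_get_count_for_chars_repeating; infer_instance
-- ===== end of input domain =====

-- B replaces A's per-character window re-scan (set(), 'in', window shifting) by a one-pass
-- sliding window keeping each character's last-seen index; objective: faster (one pass).

-- ===== PORT A =====
-- loop of A: state = (chars, counter), iterating over the remaining characters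
def goA (value : Int) : List Char → Int → List Char → Int
  | _, _, [] => 0
  | chars, counter, c :: rest =>
    if chars.length = (PySem.Set.ofList chars).length ∧ c ∉ chars ∧ (chars.length : Int) = value - 1
    then counter + 1
    else goA value (if value ≤ ((chars ++ [c]).length : Int) then (chars ++ [c]).drop 1 else chars ++ [c]) (counter + 1) rest

def get_count_for_chars_repeating (line : String) (value : Int) : Int :=
  goA value [] 0 line.toList

-- ===== PORT B =====
-- loop of B: state = (last-seen dict, window start, index), iterating over the remaining characters
def goB (value : Int) : PySem.Dict Char Int → Int → Int → List Char → Int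
  | _, _, _, [] => 0
  -- 'prev' and the updated 'start' of Source B are inlined ('start' is written out twice)
  | last, start, i, c :: rest =>
    if i - (if start < last.getD c (-1) + 1 then last.getD c (-1) + 1 else start) + 1 = value
    then i + 1
    else goB value (last.insert c i)
      (if start < last.getD c (-1) + 1 then last.getD c (-1) + 1 else start) (i + 1) rest

def get_count_for_chars_repeating_alt (line : String) (value : Int) : Int :=
  goB value PySem.Dict.empty 0 0 line.toList

-- ===== PRECONDITION & SPEC =====
def Spec_get_count_for_chars_repeating (line : String) (value : Int) (out : Int) : Prop := out = get_count_for_chars_repeating_alt line value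
instance (line : String) (value : Int) (out : Int) : Decidable (Spec_get_count_for_chars_repeating line value out) := by unfold Spec_get_count_for_chars_repeating; infer_instance

-- ===== CLAIM (what is proved, stated in full; the proofs are below) =====
def Claim_equal_get_count_for_chars_repeating : Prop := ∀ (line : String) (value : Int), Dom_get_count_for_chars_repeating line value → Spec_get_count_for_chars_repeating line value (get_count_for_chars_repeating line value)

-- ===== LEMMAS AND PROOFS =====

-- index of the first occurrence of c (length of the list if absent)
def ridx (c : Char) : List Char → Nat
  | [] => 0
  | x :: r => if x = c then 0 else ridx c r + 1

-- the longest duplicate-free prefix of a list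
def dtake : List Char → List Char
  | [] => []
  | c :: r => c :: List.takeWhile (fun x => x != c) (dtake r)

lemma ridx_le (c : Char) (l : List Char) : ridx c l ≤ l.length := by
  induction l with
  | nil => simp [ridx]
  | cons x r ih => simp only [ridx, List.length_cons]; split <;> omega

lemma len_takeWhile_ne (c : Char) (l : List Char) :
    (List.takeWhile (fun x => x != c) l).length = ridx c l := by
  induction l with
  | nil => simp [ridx]
  | cons x r ih =>
    rw [List.takeWhile_cons]
    by_cases h : x = c
    · subst h; simp [ridx]
    · simp [bne_iff_ne, h, ridx, ih]

lemma ridx_prefix (c : Char) : ∀ (s r : List Char), s <+: r →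
    ridx c s = min s.length (ridx c r) := by
  intro s
  induction s with
  | nil => intro r _; simp [ridx]
  | cons x s' ih =>
    intro r hp
    match r with
    | [] => exact absurd (List.eq_nil_of_prefix_nil hp) (by simp)
    | y :: r' =>
      rw [List.cons_prefix_cons] at hp
      obtain ⟨rfl, hp'⟩ := hp
      have := ih r' hp'
      by_cases h : x = c <;> simp [ridx, h, this]

lemma dtake_prefix : ∀ (r : List Char), dtake r <+: r
  | [] => by simp [dtake]
  | c :: r => by
    rw [dtake, List.cons_prefix_cons]
    exact ⟨rfl, (List.takeWhile_prefix _).trans (dtake_prefix r)⟩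

lemma dtake_nodup : ∀ (r : List Char), (dtake r).Nodup
  | [] => by simp [dtake]
  | c :: r => by
    rw [dtake, List.nodup_cons]
    constructor
    · intro hmem
      have := List.mem_takeWhile_imp hmem
      simp at this
    · exact ((List.takeWhile_sublist _).nodup (dtake_nodup r))

lemma dtake_len (c : Char) (r : List Char) :
    (dtake (c :: r)).length = min (dtake r).length (ridx c r) + 1 := by
  rw [dtake]
  simp only [List.length_cons, len_takeWhile_ne]
  rw [ridx_prefix c (dtake r) r (dtake_prefix r)]

lemma dtake_le (r : List Char) : (dtake r).length ≤ r.length :=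
  (dtake_prefix r).length_le

lemma take_nodup_of_le (r : List Char) (m : Nat) (h : m ≤ (dtake r).length) :
    (r.take m).Nodup := by
  obtain ⟨t, ht⟩ := dtake_prefix r
  have h2 : (dtake r ++ t).take m = (dtake r).take m := List.take_append_of_le_length h
  rw [ht] at h2
  rw [h2]
  exact (List.take_sublist _ _).nodup (dtake_nodup r)

lemma le_ridx_of_not_mem_take (c : Char) : ∀ (r : List Char) (k : Nat),
    k ≤ r.length → c ∉ r.take k → k ≤ ridx c r := by
  intro r
  induction r with
  | nil => intro k h _; simp only [List.length_nil] at h; simp only [ridx]; omega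
  | cons x r' ih =>
    intro k hk hmem
    match k with
    | 0 => omega
    | j + 1 =>
      simp only [List.take_succ_cons, List.mem_cons, not_or] at hmem
      obtain ⟨hx, hmem'⟩ := hmem
      have := ih j (by simpa using hk) hmem'
      simp [ridx, Ne.symm hx]
      omega

lemma le_dtake_of_take_nodup : ∀ (r : List Char) (m : Nat),
    m ≤ r.length → (r.take m).Nodup → m ≤ (dtake r).length := by
  intro r
  induction r with
  | nil => intro m h _; simp only [List.length_nil] at h; simp only [dtake, List.length_nil]; omega
  | cons x r' ih =>
    intro m hm hnd
    match m with
    | 0 => omega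
    | j + 1 =>
      rw [List.take_succ_cons, List.nodup_cons] at hnd
      obtain ⟨hx, hnd'⟩ := hnd
      have h1 := ih j (by simpa using hm) hnd'
      have h2 := le_ridx_of_not_mem_take x r' j (by simpa using hm) hx
      rw [dtake_len]
      omega

lemma ofList_len_le (l : List Char) : (PySem.Set.ofList l).length ≤ l.length := by
  induction l with
  | nil => simp [PySem.Set.ofList_nil]
  | cons x xs ih =>
    rw [PySem.Set.ofList_cons]
    have := List.length_filter_le (fun y => !y == x) (PySem.Set.ofList xs)
    simp only [PySem.Set.discard, List.length_cons]
    omega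

lemma nodup_iff_ofList_len (l : List Char) :
    l.length = (PySem.Set.ofList l).length ↔ l.Nodup := by
  constructor
  · intro h
    induction l with
    | nil => simp
    | cons x xs ih =>
      rw [PySem.Set.ofList_cons] at h
      simp only [PySem.Set.discard, List.length_cons] at h
      have hle := List.length_filter_le (fun y => !y == x) (PySem.Set.ofList xs)
      have hle2 := ofList_len_le xs
      have hfull : (List.filter (fun y => !y == x) (PySem.Set.ofList xs)).length
          = (PySem.Set.ofList xs).length := by omega
      have hnd : xs.Nodup := ih (by omega)
      rw [List.nodup_cons]
      refine ⟨?_, hnd⟩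
      intro hxmem
      have hxset : x ∈ PySem.Set.ofList xs := (PySem.Set.mem_ofList xs x).2 hxmem
      have : ∀ y ∈ PySem.Set.ofList xs, (!y == x) = true :=
        List.length_filter_eq_length_iff.1 hfull
      have := this x hxset
      simp at this
  · intro h
    rw [PySem.Set.ofList_eq_self_of_nodup l h]

lemma getD_empty (c : Char) : (PySem.Dict.empty : PySem.Dict Char Int).getD c (-1) = -1 := by
  simp [PySem.Dict.getD, PySem.Dict.empty, PySem.Dict.get?]

-- the A-loop with value ≤ 0 keeps chars = [] and never fires
lemma goA_nonpos (value : Int) (hv : value ≤ 0) :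
    ∀ (rest : List Char) (counter : Int), goA value [] counter rest = 0 := by
  intro rest
  induction rest with
  | nil => intro counter; simp [goA]
  | cons c rest' ih =>
    intro counter
    rw [goA]
    have hcond : ¬ (([] : List Char).length = (PySem.Set.ofList ([] : List Char)).length ∧
        c ∉ ([] : List Char) ∧ ((([] : List Char).length : Int) = value - 1)) := by
      simp; omega
    rw [if_neg hcond]
    have : (if value ≤ ((([] : List Char) ++ [c]).length : Int) then (([] : List Char) ++ [c]).drop 1 else ([] : List Char) ++ [c]) = [] := by
      simp; omega
    rw [this]
    exact ih _

-- the B-loop with value ≤ 0 never fires (window size stays ≥ 1 > value)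
lemma goB_nonpos (value : Int) (hv : value ≤ 0) :
    ∀ (rest : List Char) (last : PySem.Dict Char Int) (start i : Int),
      (∀ c, last.getD c (-1) < i) → start ≤ i → goB value last start i rest = 0 := by
  intro rest
  induction rest with
  | nil => intro last start i _ _; simp [goB]
  | cons c rest' ih =>
    intro last start i hlast hstart
    rw [goB]
    have hprev := hlast c
    have hs' : (if start < last.getD c (-1) + 1 then last.getD c (-1) + 1 else start) ≤ i := by
      split <;> omega
    rw [if_neg (by omega)]
    refine ih _ _ _ ?_ (by omega)
    intro c'
    rw [PySem.Dict.getD_insert]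
    split <;> [omega; exact lt_trans (hlast c') (by omega)]

-- the bisimulation: A's window state determines B's (start, last-seen) state and vice versa
lemma bisim (value : Int) (hv : 1 ≤ value) :
    ∀ (rest p : List Char) (last : PySem.Dict Char Int),
      (∀ c, last.getD c (-1) = (p.length : Int) - 1 - (ridx c p.reverse : Nat)) →
      ((dtake p.reverse).length : Int) ≤ value - 1 →
      goA value ((p.reverse.take (value - 1).toNat).reverse) p.length rest
        = goB value last ((p.length : Int) - (dtake p.reverse).length) p.length rest := by
  intro rest
  induction rest with
  | nil => intro p last _ _; simp [goA, goB]
  | cons c rest' ih =>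
    intro p last hlast hds
    have hk : (((value - 1).toNat : Nat) : Int) = value - 1 := Int.toNat_of_nonneg (by omega)
    set k : Nat := (value - 1).toNat with hkdef
    set r : List Char := p.reverse with hrdef
    have hrp : r.length = p.length := by rw [hrdef, List.length_reverse]
    set n : Nat := p.length with hndef
    set D : Nat := (dtake r).length with hDdef
    set R : Nat := ridx c r with hRdef
    have hDle : D ≤ n := by rw [hDdef, ← hrp]; exact dtake_le r
    have hRle : R ≤ n := by rw [hRdef, ← hrp]; exact ridx_le c r
    have hdlen : (dtake (c :: r)).length = min D R + 1 := dtake_len c r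
    have hprev := hlast c
    rw [goA, goB]
    have hstart' : (if (n : Int) - D < last.getD c (-1) + 1 then last.getD c (-1) + 1
        else (n : Int) - D) = (n : Int) - (min D R : Nat) := by
      rw [hprev]
      have : ((min D R : Nat) : Int) = min (D : Int) (R : Int) := by
        simp [Nat.cast_min]
      rw [this]
      split <;> omega
    rw [hstart']
    -- the two loop conditions are equivalent
    have hchars_len : ((r.take k).reverse).length = min k r.length := by
      simp [List.length_reverse, List.length_take]
    have hcond : ((((r.take k).reverse).length = (PySem.Set.ofList ((r.take k).reverse)).length ∧
          c ∉ (r.take k).reverse ∧ ((((r.take k).reverse).length : Int) = value - 1))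
        ↔ ((n : Int) - ((n : Int) - (min D R : Nat)) + 1 = value)) := by
      constructor
      · rintro ⟨h1, h2, h3⟩
        have hnd : ((r.take k).reverse).Nodup := (nodup_iff_ofList_len _).1 h1
        rw [List.nodup_reverse] at hnd
        rw [List.mem_reverse] at h2
        rw [hchars_len] at h3
        have hklen : k ≤ r.length := by omega
        have hcons : ((c :: r).take (k + 1)).Nodup := by
          rw [List.take_succ_cons, List.nodup_cons]; exact ⟨h2, hnd⟩
        have := le_dtake_of_take_nodup (c :: r) (k + 1) (by simp; omega) hcons
        rw [hdlen] at this
        have hDk : D ≤ k := by omega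
        have : min D R = k := by omega
        omega
      · intro h
        have hmin : min D R = k := by omega
        have hklen : k ≤ r.length := by omega
        have hnd : ((c :: r).take (k + 1)).Nodup := by
          refine take_nodup_of_le (c :: r) (k + 1) ?_
          rw [hdlen]; omega
        rw [List.take_succ_cons, List.nodup_cons] at hnd
        obtain ⟨h2, h1⟩ := hnd
        refine ⟨?_, by rwa [List.mem_reverse], by rw [hchars_len]; omega⟩
        exact ((nodup_iff_ofList_len _).2 (by rwa [List.nodup_reverse])).symm ▸ rfl
    by_cases hc : ((n : Int) - ((n : Int) - (min D R : Nat)) + 1 = value)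
    · rw [if_pos (hcond.2 hc), if_pos hc]
    · rw [if_neg (fun h => hc (hcond.1 h)), if_neg hc]
      -- recurse: new ghost prefix p ++ [c]
      have hrev : (p ++ [c]).reverse = c :: r := by simp [hrdef]
      have hlen : (p ++ [c]).length = n + 1 := by simp [hndef]
      have ihs := ih (p ++ [c]) (last.insert c n)
      rw [hrev, hlen] at ihs
      -- new window
      have hwin : (if value ≤ (((r.take k).reverse ++ [c]).length : Int)
            then ((r.take k).reverse ++ [c]).drop 1 else (r.take k).reverse ++ [c])
          = ((c :: r).take k).reverse := by
        have hlen2 : (((r.take k).reverse ++ [c]).length : Int) = min k r.length + 1 := by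
          simp [List.length_take]
        by_cases hkr : k ≤ r.length
        · rw [if_pos (by rw [hlen2]; omega)]
          match k, hk with
          | 0, _ => simp
          | j + 1, _ =>
            have hj : j < r.length := by omega
            have htake : r.take (j + 1) = r.take j ++ [r[j]] := by
              rw [List.take_add_one, List.getElem?_eq_getElem hj]; simp
            rw [List.take_succ_cons, htake, List.reverse_append]
            simp
        · rw [if_neg (by rw [hlen2]; omega)]
          rw [List.take_of_length_le (by omega), List.take_of_length_le (by simp; omega)]
          simp
      rw [hwin] at *
      refine (ihs ?_ ?_).trans ?_
      · intro c'
        rw [PySem.Dict.getD_insert]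
        by_cases hcc : c' = c
        · subst hcc
          rw [if_pos rfl]
          have : ridx c' (c' :: r) = 0 := by simp [ridx]
          rw [this]; push_cast; omega
        · rw [if_neg hcc]
          have hne : ¬ c = c' := fun h => hcc h.symm
          have hstep : ridx c' (c :: r) = ridx c' r + 1 := by simp [ridx, hne]
          rw [hlast c', hstep]
          push_cast; omega
      · rw [hdlen]; push_cast
        have : min D R ≤ D := min_le_left _ _
        omega
      · rw [hdlen]; push_cast; ring_nf

-- ===== VERDICT (by name: the statement is the Claim_ definition above) =====
theorem get_count_for_chars_repeating_spec : Claim_equal_get_count_for_chars_repeating := by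
  intro line value _
  unfold Spec_get_count_for_chars_repeating get_count_for_chars_repeating get_count_for_chars_repeating_alt
  by_cases hv : 1 ≤ value
  · have := bisim value hv line.toList [] PySem.Dict.empty
      (by intro c; rw [getD_empty]; simp [ridx])
      (by simp [dtake]; omega)
    simpa [dtake] using this
  · rw [goA_nonpos value (by omega) line.toList 0,
        goB_nonpos value (by omega) line.toList PySem.Dict.empty 0 0
          (by intro c; rw [getD_empty]; omega) (by omega)]
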